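-- pv_equiv track=rewrite | github.com/Abdullah2240/Encoding-EGNOS-messages | backend/helper.py | crc24_check
-- ===== SOURCE A (Python) =====
-- CRC24_POLY = "1100001100100110011111011"  # binary form as per Qualcom computing standards in CRC-24
--
-- def crc24_check(codeword_bits: str) -> bool:
--     """Checks if a CRC-24 encoded binary string is error-free."""
--     n = len(CRC24_POLY)
--     remainder = codeword_bits
--     for i in range(len(codeword_bits) - (n - 1)):
--         if remainder[i] == "1":
--             remainder = (remainder[:i] +
--                          ''.join('0' if remainder[i + j] == CRC24_POLY[j] else '1'
--                                  for j in range(n)) +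
--                          remainder[i + n:])
--     return set(remainder[-(n - 1):]) == {"0"}  # True if no error
-- ===== SOURCE B (Python) =====
-- CRC24_POLY = "1100001100100110011111011"  # binary form as per Qualcom computing standards in CRC-24
--
--
-- def crc24_check(codeword_bits: str) -> bool:
--     """Checks if a CRC-24 encoded binary string is error-free.
--
--     Shift-register formulation: a 24-cell register slides over the input,
--     instead of rebuilding the whole remainder string at every reducing step.
--     """
--     n = len(CRC24_POLY)
--     tail = CRC24_POLY[1:]
--     reg = list(codeword_bits[:n - 1])
--     for c in codeword_bits[n - 1:]:
--         head = reg[0]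
--         reg = reg[1:] + [c]
--         if head == "1":
--             reg = ["0" if a == b else "1" for a, b in zip(reg, tail)]
--     return bool(reg) and all(x == "0" for x in reg)
-- ===== Notes on version B (the rewrite author's own statement) =====
-- stated objective: alternative
-- what changed: Replaces the polynomial long division that repeatedly rebuilds the whole remainder string with a sliding 24-cell shift register updated once per consumed character.
import Mathlib
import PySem

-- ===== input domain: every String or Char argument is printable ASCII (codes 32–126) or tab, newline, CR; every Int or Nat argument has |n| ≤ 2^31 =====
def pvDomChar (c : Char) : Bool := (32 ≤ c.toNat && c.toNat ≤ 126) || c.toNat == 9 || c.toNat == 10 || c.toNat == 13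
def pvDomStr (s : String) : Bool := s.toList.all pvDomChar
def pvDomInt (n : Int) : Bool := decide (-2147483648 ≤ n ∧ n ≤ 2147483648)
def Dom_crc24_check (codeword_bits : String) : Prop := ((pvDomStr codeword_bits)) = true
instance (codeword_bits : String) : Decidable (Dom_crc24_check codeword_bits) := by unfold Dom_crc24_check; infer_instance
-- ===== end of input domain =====

-- B replaces A's remainder-string rebuilding long division with a sliding 24-cell shift
-- register updated once per consumed character (objective: alternative).

def CRC24_POLY : String := "1100001100100110011111011"

-- ===== PORT A =====
-- Python string indexing yields a 1-char string; under the convention it is a Char here, so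
-- remainder[i] == "1" is ported as pyGet? … == some '1' and set(remainder[-24:]) == {"0"} as a
-- PySem.Set of Chars compared with {'0'} (1-char strings ↔ chars, exact on this use).
def crc24_check (codeword_bits : String) : Bool :=
  let n : Int := PySem.Str.len CRC24_POLY
  let remainder :=
    (PySem.List.pyRange 0 (PySem.Str.len codeword_bits - (n - 1)) 1).foldl
      (fun remainder i =>
        if PySem.Str.pyGet? remainder i == some '1' then
          PySem.Str.slice remainder none (some i)
            ++ PySem.Str.join ""
                ((PySem.List.pyRange 0 n 1).map (fun j =>
                  if PySem.Str.pyGet? remainder (i + j) == PySem.Str.pyGet? CRC24_POLY j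
                  then "0" else "1"))
            ++ PySem.Str.slice remainder (some (i + n)) none
        else remainder)
      codeword_bits
  PySem.Set.equal
    (PySem.Set.ofList (PySem.Str.slice remainder (some (-(n - 1))) none).toList)
    (PySem.Set.ofList ['0'])

-- ===== PORT B =====
-- reg[0] is only read while the register holds 24 cells (the loop body runs only when
-- len(codeword_bits) ≥ 25), so the total pyGetD form with a dummy default is exact.
def crc24_check_alt (codeword_bits : String) : Bool :=
  let n : Int := PySem.Str.len CRC24_POLY
  let tail := PySem.Str.slice CRC24_POLY (some 1) none
  let reg :=
    (PySem.Str.slice codeword_bits (some (n - 1)) none).toList.foldl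
      (fun reg c =>
        let head := PySem.List.pyGetD reg 0 ' '
        let reg := PySem.List.slice reg (some 1) none ++ [c]
        if head == '1' then
          (reg.zip tail.toList).map (fun p => if p.1 == p.2 then '0' else '1')
        else reg)
      (PySem.Str.slice codeword_bits none (some (n - 1))).toList
  !reg.isEmpty && reg.all (· == '0')

-- ===== PRECONDITION & SPEC =====
def Spec_crc24_check (codeword_bits : String) (out : Bool) : Prop := out = crc24_check_alt codeword_bits
instance (codeword_bits : String) (out : Bool) : Decidable (Spec_crc24_check codeword_bits out) := by unfold Spec_crc24_check; infer_instance

-- ===== CLAIM (what is proved, stated in full; the proofs are below) =====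
def Claim_equal_crc24_check : Prop := ∀ (codeword_bits : String), Dom_crc24_check codeword_bits → Spec_crc24_check codeword_bits (crc24_check codeword_bits)

-- ===== LEMMAS AND PROOFS =====

-- the polynomial as a char list
def polyC : List Char := CRC24_POLY.toList

lemma polyC_len : polyC.length = 25 := by decide

-- A's loop body at the char-list level
def stepA (r : List Char) (i : Int) : List Char :=
  if PySem.Chars.pyGet? r i == some '1' then
    PySem.Chars.slice r none (some i)
      ++ PySem.Chars.join []
          ((PySem.List.pyRange 0 25 1).map (fun j =>
            if PySem.Chars.pyGet? r (i + j) == PySem.Chars.pyGet? polyC j then ['0'] else ['1']))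
      ++ PySem.Chars.slice r (some (i + 25)) none
  else r

-- B's loop body at the char-list level
def stepB (reg : List Char) (c : Char) : List Char :=
  let head := PySem.List.pyGetD reg 0 ' '
  let reg := PySem.List.slice reg (some 1) none ++ [c]
  if head == '1' then
    (reg.zip polyC.tail).map (fun p => if p.1 == p.2 then '0' else '1')
  else reg

lemma stepB_length (reg : List Char) (c : Char) (h : reg.length = 24) :
    (stepB reg c).length = 24 := by
  unfold stepB
  rw [PySem.List.slice_from_one]
  dsimp only
  split
  · simp [List.length_tail, h, polyC]
    decide
  · simp [List.length_tail, h]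

lemma foldB_length : ∀ (suf reg : List Char), reg.length = 24 →
    (suf.foldl stepB reg).length = 24 := by
  intro suf
  induction suf with
  | nil => intro reg h; simpa using h
  | cons c rest ih => intro reg h; rw [List.foldl_cons]; exact ih _ (stepB_length reg c h)

lemma flatten_intersperse_nil {α : Type} (ls : List (List α)) :
    (List.intersperse [] ls).flatten = ls.flatten := by
  induction ls with
  | nil => rfl
  | cons a t ih =>
    cases t with
    | nil => rfl
    | cons b t2 =>
      rw [show List.intersperse ([] : List α) (a :: b :: t2) = a :: [] :: List.intersperse [] (b :: t2) from rfl]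
      simp [ih]

lemma join_nil (ls : List (List Char)) : PySem.Chars.join [] ls = ls.flatten := by
  simp [PySem.Chars.join, List.intercalate, flatten_intersperse_nil]

lemma flatten_map_singleton {α β : Type} (l : List α) (f : α → β) :
    (l.map (fun x => [f x])).flatten = l.map f := by
  induction l with | nil => rfl | cons a t ih => simp [ih]

-- the final membership test, in both phrasings
lemma setEq0 (l : List Char) :
    PySem.Set.equal (PySem.Set.ofList l) (PySem.Set.ofList ['0'])
      = (!l.isEmpty && l.all (· == '0')) := by
  rw [Bool.eq_iff_iff, PySem.Set.equal_iff]
  simp only [PySem.Set.mem_ofList, Bool.and_eq_true, Bool.not_eq_true', List.isEmpty_eq_false_iff,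
    List.all_eq_true, beq_iff_eq, List.mem_singleton]
  constructor
  · intro h
    have h0 : '0' ∈ l := (h '0').mpr rfl
    exact ⟨List.ne_nil_of_mem h0, fun x hx => (h x).mp hx⟩
  · rintro ⟨hne, hall⟩ x
    constructor
    · exact hall x
    · rintro rfl
      rcases l with _ | ⟨a, t⟩
      · exact absurd rfl hne
      · have := hall a (List.mem_cons_self)
        subst this; exact List.mem_cons_self

-- a ranged if-map over two in-range windows is the zip-map of the windows
lemma range_zip {β : Type} (g : Option Char → Option Char → β) :
    ∀ (p w r : List Char) (i : Nat), w.length = p.length →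
      (∀ j, j < w.length → r[i + j]? = w[j]?) →
      (List.range p.length).map (fun k => g r[i + k]? p[k]?)
        = (w.zip p).map (fun q => g (some q.1) (some q.2)) := by
  intro p
  induction p with
  | nil => intro w r i hw _; simp [List.length_eq_zero_iff.mp (hw.trans rfl)]
  | cons a pt ih =>
    intro w r i hw hr
    rcases w with _ | ⟨b, wt⟩
    · simp at hw
    · have h0 : r[i + 0]? = some b := by simpa using hr 0 (by simp)
      have hr' : ∀ j, j < wt.length → r[i + 1 + j]? = wt[j]? := by
        intro j hj
        have := hr (j + 1) (by simpa using Nat.succ_lt_succ hj)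
        simpa [Nat.add_assoc, Nat.add_comm 1 j] using this
      have htail := ih wt r (i + 1) (by simpa using hw) hr'
      simp only [List.length_cons, List.range_succ_eq_map, List.map_cons, List.map_map]
      rw [h0]
      simp only [List.zip_cons_cons, List.map_cons, List.getElem?_cons_zero]
      congr 1
      rw [← htail]
      apply List.map_congr_left
      intro k _
      simp [Function.comp, Nat.add_assoc, Nat.add_comm 1 k]

-- A's XOR window at offset pre.length is the zip-map of the 25 cells sitting there
lemma window_eq (pre mid suf : List Char) (hm : mid.length = 25) :
    (PySem.List.pyRange 0 25 1).map (fun j =>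
        if PySem.Chars.pyGet? (pre ++ mid ++ suf) ((pre.length : Int) + j) == PySem.Chars.pyGet? polyC j
        then (['0'] : List Char) else ['1'])
      = (mid.zip polyC).map (fun p => if p.1 == p.2 then ['0'] else ['1']) := by
  have h25 : (PySem.List.pyRange 0 25 1) = (List.range 25).map (fun k : Nat => (k : Int)) := by
    rw [show (25 : Int) = ((25 : Nat) : Int) by norm_num]
    exact PySem.List.pyRange_zero_nat 25
  rw [h25, List.map_map]
  have hbody : ((fun j : Int =>
        if PySem.Chars.pyGet? (pre ++ mid ++ suf) ((pre.length : Int) + j) == PySem.Chars.pyGet? polyC j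
        then (['0'] : List Char) else ['1']) ∘ (fun k : Nat => (k : Int)))
      = fun k : Nat =>
        (fun o1 o2 : Option Char => if o1 == o2 then (['0'] : List Char) else ['1'])
          (pre ++ mid ++ suf)[pre.length + k]? polyC[k]? := by
    funext k
    simp only [Function.comp, PySem.Chars.pyGet?]
    simp only [show ((pre.length : Int) + (k : Int)) = ((pre.length + k : Nat) : Int) by push_cast; ring,
      PySem.List.pyGet?_natCast]
  rw [hbody, show (25 : Nat) = polyC.length from polyC_len.symm]
  rw [range_zip (fun o1 o2 : Option Char => if o1 == o2 then (['0'] : List Char) else ['1'])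
      polyC mid (pre ++ mid ++ suf) pre.length (hm.trans polyC_len.symm) ?_]
  · simp
  · intro j hj
    rw [List.append_assoc, List.getElem?_append_right (by omega), Nat.add_sub_cancel_left,
      List.getElem?_append_left (by omega)]

-- A's fold, run over a string, computes stepA on the underlying char list
lemma foldl_toList {α : Type} (l : List α) (f : String → α → String) (g : List Char → α → List Char)
    (h : ∀ s x, (f s x).toList = g s.toList x) (s : String) :
    (l.foldl f s).toList = l.foldl g s.toList := by
  induction l generalizing s with
  | nil => rfl
  | cons a t ih => rw [List.foldl_cons, List.foldl_cons, ih, h]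

lemma foldA_toList (l : List Int) (s : String) :
    ((l.foldl
      (fun remainder i =>
        if PySem.Str.pyGet? remainder i == some '1' then
          PySem.Str.slice remainder none (some i)
            ++ PySem.Str.join ""
                ((PySem.List.pyRange 0 25 1).map (fun j =>
                  if PySem.Str.pyGet? remainder (i + j) == PySem.Str.pyGet? CRC24_POLY j
                  then "0" else "1"))
            ++ PySem.Str.slice remainder (some (i + 25)) none
        else remainder)
      s).toList) = l.foldl stepA s.toList := by
  apply foldl_toList
  intro s i
  simp only [stepA, PySem.Str.pyGet?, polyC, apply_ite String.toList, String.toList_append,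
    PySem.Str.toList_slice, PySem.Str.toList_join, List.map_map,
    show ("" : String).toList = [] from rfl]
  split
  · congr 2
    · congr 1
      apply List.map_congr_left
      intro j _
      dsimp only [Function.comp]
      split <;> rfl
  · rfl

-- THE INVARIANT: A's division loop is a dead prefix plus B's shift register
lemma loopA_decomp : ∀ (suf pre reg : List Char), reg.length = 24 →
    ∃ pre', (PySem.List.pyRange (pre.length : Int) ((pre.length : Int) + (suf.length : Int)) 1).foldl
              stepA (pre ++ (reg ++ suf))
        = pre' ++ suf.foldl stepB reg ∧ pre'.length = pre.length + suf.length := by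
  intro suf
  induction suf with
  | nil =>
    intro pre reg _
    refine ⟨pre, ?_, by simp⟩
    rw [show ((pre.length : Int) + (([] : List Char).length : Int)) = (pre.length : Int) by simp,
      PySem.List.pyRange_one_eq_nil (le_refl _)]
    simp
  | cons c rest ih =>
    intro pre reg hreg
    rcases reg with _ | ⟨h, rt⟩
    · simp at hreg
    have hrt : rt.length = 23 := by simpa using hreg
    rw [show (((c :: rest).length : Int)) = (rest.length : Int) + 1 by push_cast [List.length_cons]; ring]
    rw [PySem.List.pyRange_one_cons (by omega), List.foldl_cons]
    have hget : PySem.Chars.pyGet? (pre ++ ((h :: rt) ++ (c :: rest))) (pre.length : Int) = some h := by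
      show PySem.List.pyGet? _ _ = _
      rw [PySem.List.pyGet?_natCast, List.getElem?_append_right (by omega)]
      simp
    by_cases hh : h = '1'
    · -- the head cell is '1': one XOR step of the division = one XOR step of the register
      subst hh
      have hw : pre ++ (('1' :: rt) ++ (c :: rest)) = pre ++ (('1' :: rt) ++ [c]) ++ rest := by
        simp
      have hstep : stepA (pre ++ (('1' :: rt) ++ (c :: rest))) (pre.length : Int)
          = (pre ++ ['0']) ++ ((stepB ('1' :: rt) c) ++ rest) := by
        unfold stepA
        rw [hget]
        simp only [beq_self_eq_true, if_true]
        rw [hw]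
        rw [window_eq pre (('1' :: rt) ++ [c]) rest (by simp [hrt])]
        rw [show (fun p : Char × Char => if p.1 == p.2 then (['0'] : List Char) else ['1'])
              = fun p : Char × Char => [if p.1 == p.2 then '0' else '1'] from
            funext fun p => by split <;> rfl]
        rw [join_nil, flatten_map_singleton]
        show PySem.List.slice _ none (some _) ++ _ ++ PySem.List.slice _ (some _) none = _
        rw [PySem.List.slice_to_natCast]
        rw [show ((pre.length : Int) + 25) = ((pre.length + 25 : Nat) : Int) by push_cast; ring,
          PySem.List.slice_from_natCast]
        rw [show pre.length + 25 = (pre ++ (('1' :: rt) ++ [c])).length by simp [hrt],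
          List.drop_left]
        rw [show (pre ++ (('1' :: rt) ++ [c]) ++ rest).take pre.length
              = (pre ++ ((('1' :: rt) ++ [c]) ++ rest)).take pre.length by simp,
          List.take_left' rfl]
        rw [show polyC = '1' :: polyC.tail from by decide]
        rw [show ('1' :: rt) ++ [c] = '1' :: (rt ++ [c]) from rfl, List.zip_cons_cons, List.map_cons]
        rw [show stepB ('1' :: rt) c
              = ((rt ++ [c]).zip polyC.tail).map (fun p => if p.1 == p.2 then '0' else '1') from by
            unfold stepB
            rw [PySem.List.pyGetD_zero_cons, PySem.List.slice_from_one]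
            simp]
        simp
      rw [hstep]
      obtain ⟨pre', hp, hl⟩ := ih (pre ++ ['0'])
        ((stepB ('1' :: rt) c)) (by
          unfold stepB
          rw [PySem.List.pyGetD_zero_cons, PySem.List.slice_from_one]
          simp [hrt, show polyC.tail.length = 24 from by decide])
      refine ⟨pre', ?_, by simp at hl ⊢; omega⟩
      rw [show ((pre.length : Int) + 1) = (((pre ++ ['0']).length : Nat) : Int) by simp,
        show ((pre.length : Int) + ((rest.length : Int) + 1))
            = (((pre ++ ['0']).length : Nat) : Int) + (rest.length : Int) by simp; ring]
      rw [hp]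
      rw [List.foldl_cons]
    · -- the head cell is not '1': the division skips, the register shifts
      have hstep : stepA (pre ++ ((h :: rt) ++ (c :: rest))) (pre.length : Int)
          = (pre ++ [h]) ++ ((stepB (h :: rt) c) ++ rest) := by
        unfold stepA
        rw [hget]
        simp only [beq_iff_eq, Option.some.injEq, hh, if_false]
        rw [show stepB (h :: rt) c = rt ++ [c] from by
          unfold stepB
          rw [PySem.List.pyGetD_zero_cons, PySem.List.slice_from_one]
          simp [hh]]
        simp
      rw [hstep]
      obtain ⟨pre', hp, hl⟩ := ih (pre ++ [h]) (stepB (h :: rt) c) (by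
        rw [show stepB (h :: rt) c = rt ++ [c] from by
          unfold stepB
          rw [PySem.List.pyGetD_zero_cons, PySem.List.slice_from_one]
          simp [hh]]
        simp [hrt])
      refine ⟨pre', ?_, by simp at hl ⊢; omega⟩
      rw [show ((pre.length : Int) + 1) = (((pre ++ [h]).length : Nat) : Int) by simp,
        show ((pre.length : Int) + ((rest.length : Int) + 1))
            = (((pre ++ [h]).length : Nat) : Int) + (rest.length : Int) by simp; ring]
      rw [hp]
      rw [List.foldl_cons]

-- ===== VERDICT (by name: the statement is the Claim_ definition above) =====
theorem crc24_check_spec : Claim_equal_crc24_check := by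
  intro s _
  unfold Spec_crc24_check
  show crc24_check s = crc24_check_alt s
  unfold crc24_check crc24_check_alt
  have hn : PySem.Str.len CRC24_POLY = 25 := by decide
  simp only [hn]
  rw [PySem.Str.toList_slice, foldA_toList]
  have htail : (PySem.Str.slice CRC24_POLY (some 1)).toList = polyC.tail := by
    rw [PySem.Str.toList_slice]
    show PySem.List.slice _ _ _ = _
    rw [PySem.List.slice_from_one]; rfl
  simp only [htail]
  rw [show (List.foldl (fun (reg : List Char) (c : Char) =>
        if (PySem.List.pyGetD reg 0 ' ' == '1') = true then
          List.map (fun p => if (p.1 == p.2) = true then '0' else '1')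
            ((PySem.List.slice reg (some 1) ++ [c]).zip polyC.tail)
        else PySem.List.slice reg (some 1) ++ [c]) : List Char → List Char → List Char) = List.foldl stepB from rfl]
  simp only [show ((25 : Int) - 1) = 24 by norm_num, PySem.Str.toList_slice]
  have h1 : PySem.Chars.slice s.toList none (some 24) = s.toList.take 24 := by
    show PySem.List.slice _ _ _ = _
    rw [show ((24 : Int)) = ((24 : Nat) : Int) by norm_num, PySem.List.slice_to_natCast]
  have h2 : PySem.Chars.slice s.toList (some 24) none = s.toList.drop 24 := by
    show PySem.List.slice _ _ _ = _
    rw [show ((24 : Int)) = ((24 : Nat) : Int) by norm_num, PySem.List.slice_from_natCast]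
  rw [h1, h2, PySem.Str.len_eq s]
  by_cases h24 : 24 ≤ s.toList.length
  · have h24' : 24 ≤ s.length := by simpa using h24
    obtain ⟨pre', hp, hl⟩ := loopA_decomp (s.toList.drop 24) [] (s.toList.take 24)
      (by simp [List.length_take]; omega)
    have hrange : PySem.List.pyRange 0 ((s.toList.length : Int) - 24) 1
        = PySem.List.pyRange ((([] : List Char).length : Int))
            ((([] : List Char).length : Int) + ((s.toList.drop 24).length : Int)) 1 := by
      congr 1
      simp
      omega
    have hinit : ([] : List Char) ++ (s.toList.take 24 ++ s.toList.drop 24) = s.toList := by simp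
    rw [hinit, ← hrange] at hp
    rw [hp]
    have hreg : ((s.toList.drop 24).foldl stepB (s.toList.take 24)).length = 24 :=
      foldB_length _ _ (by simp [List.length_take]; omega)
    have hslice : PySem.Chars.slice (pre' ++ (s.toList.drop 24).foldl stepB (s.toList.take 24))
        (some (-24)) none = (s.toList.drop 24).foldl stepB (s.toList.take 24) := by
      show PySem.List.slice _ _ _ = _
      rw [PySem.List.slice_from_neg_ofNat _ 24 (by norm_num)]
      rw [show (pre' ++ (s.toList.drop 24).foldl stepB (s.toList.take 24)).length - 24
            = pre'.length by simp [hreg]]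
      exact List.drop_left
    rw [hslice, setEq0]
  · rw [show PySem.List.pyRange 0 ((s.toList.length : Int) - 24) 1 = [] from
      PySem.List.pyRange_one_eq_nil (by omega), List.foldl_nil]
    rw [show s.toList.take 24 = s.toList from List.take_of_length_le (by omega),
      show s.toList.drop 24 = ([] : List Char) from List.drop_eq_nil_of_le (by omega),
      List.foldl_nil]
    have hslice : PySem.Chars.slice s.toList (some (-24)) none = s.toList := by
      show PySem.List.slice _ _ _ = _
      rw [PySem.List.slice_from_neg_ofNat _ 24 (by norm_num)]
      rw [show s.toList.length - 24 = 0 by omega, List.drop_zero]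
    rw [hslice, setEq0]
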